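-- pv_equiv track=rewrite | github.com/sanketsharma411/keyword-density-analyzer | modules/nlp.py | merge_ner_tags
-- ===== SOURCE A (Python) =====
-- def merge_same_ner_tags(temp_array):
--     """ Merge tokens from the temp array into one token_tag tuple """
--
--     merged_token = ' '.join(token_tag[0] for token_tag in temp_array)
--     merged_tag = tuple({token_tag[1] for token_tag in temp_array})
--     if len(merged_tag) != 1:
--         raise ValueError('Trying to merge tokens with different NER tags %s ' %str(temp_array))
--     return merged_token,merged_tag[0]
--
-- def merge_ner_tags(text_ner_tags):
--     """ Combine adjacent tokens with same NER tag into one token"""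
--
--     merged_ner_tags = []
--     temp_array = []
--     prev_tag = 'O'
--
--     for token_tag in text_ner_tags:
--         tag = token_tag[1]
--
--         if tag == 'O':
--             # There can not be an continuity so empty the array and append the results to merged
--             if len(temp_array) != 0:
--                 # Merge the contents
--                 m_token,m_tag = merge_same_ner_tags(temp_array)
--                 merged_ner_tags.append((m_token,m_tag))
--                 #print temp_array,'!!!'
--                 temp_array = []
--
--             merged_ner_tags.append(token_tag)
--             prev_tag = tag
--
--         elif prev_tag != 'O' and tag == prev_tag:
--             # continue the chain
--             temp_array.append(token_tag)
--             prev_tag = tag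
--
--
--         else:
--             # current tag != 0 and prev_tag == 0 or tag != prev_tag
--             # Start of something new
--             if len(temp_array) != 0:
--                 # Merge the contents
--                 m_token,m_tag = merge_same_ner_tags(temp_array)
--                 merged_ner_tags.append((m_token,m_tag))
--                 #print temp_array,'!!!'
--                 temp_array = []
--
--             temp_array.append(token_tag)
--             prev_tag = tag
--
--
--     if len(temp_array) != 0:
--         merged_token = ' '.join(token_tag[0] for token_tag in temp_array)
--         merged_tag = tuple({token_tag[1] for token_tag in temp_array})[0]
--         merged_token_tag = (merged_token,merged_tag)
--         merged_ner_tags.append(merged_token_tag)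
--
--     return merged_ner_tags
-- ===== SOURCE B (Python) =====
-- def merge_ner_tags(text_ner_tags):
--     """Combine adjacent tokens with same NER tag into one token.
--
--     Scans the list run by run with two indices: each maximal run of a
--     non-'O' tag becomes one (joined_text, tag) tuple; 'O' items are
--     copied through individually.
--     """
--     result = []
--     i = 0
--     n = len(text_ner_tags)
--     while i < n:
--         tag = text_ner_tags[i][1]
--         j = i + 1
--         while j < n and text_ner_tags[j][1] == tag:
--             j += 1
--         if tag == 'O':
--             result.extend(text_ner_tags[i:j])
--         else:
--             result.append((' '.join(t[0] for t in text_ner_tags[i:j]), tag))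
--         i = j
--     return result
-- ===== Notes on version B (the rewrite author's own statement) =====
-- stated objective: simpler
-- what changed: Replaces A's stateful accumulator machine (temp_array/prev_tag with flush logic spread over three branches plus a trailing flush and a set-based tag check) by a direct two-index run scan: find each maximal run of equal tag, emit it joined (or item-by-item for 'O').
import Mathlib
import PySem

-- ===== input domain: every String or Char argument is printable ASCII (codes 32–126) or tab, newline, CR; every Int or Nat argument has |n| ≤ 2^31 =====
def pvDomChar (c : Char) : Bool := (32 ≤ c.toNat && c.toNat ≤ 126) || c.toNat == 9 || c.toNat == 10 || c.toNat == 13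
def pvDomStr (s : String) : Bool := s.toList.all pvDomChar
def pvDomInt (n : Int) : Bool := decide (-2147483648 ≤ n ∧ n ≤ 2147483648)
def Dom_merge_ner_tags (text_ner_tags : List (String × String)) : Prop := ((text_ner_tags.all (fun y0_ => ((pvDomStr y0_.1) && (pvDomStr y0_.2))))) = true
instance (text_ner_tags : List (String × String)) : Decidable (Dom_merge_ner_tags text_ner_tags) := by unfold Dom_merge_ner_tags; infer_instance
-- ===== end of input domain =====

-- B replaces A's stateful accumulator machine by a direct two-index run scan (simpler); return values proved equal on all inputs.

-- ===== PORT A =====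
-- helper merge_same_ner_tags: joins the tokens and takes the unique tag out of the set of tags.
-- The ValueError branch (len(merged_tag) != 1) is unreachable from merge_ner_tags: temp_array is
-- always nonempty with all tags equal, so the set is the singleton [tag]; we return its head.
def merge_same_ner_tags (temp_array : List (String × String)) : String × String :=
  let merged_token := PySem.Str.join " " (temp_array.map (·.1))
  let merged_tag := PySem.Set.ofList (temp_array.map (·.2))
  (merged_token, merged_tag.headD "")

-- the for-loop of A as structural recursion over the same state (merged_ner_tags, temp_array, prev_tag)
def mergeGoA (acc temp : List (String × String)) (prev : String) :
    List (String × String) → List (String × String)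
  | [] =>
      -- trailing flush (A inlines merge_same_ner_tags here without the length check)
      if temp.length ≠ 0 then
        acc ++ [(PySem.Str.join " " (temp.map (·.1)),
                 (PySem.Set.ofList (temp.map (·.2))).headD "")]
      else acc
  | token_tag :: rest =>
      let tag := token_tag.2
      if tag == "O" then
        mergeGoA ((if temp.length ≠ 0 then acc ++ [merge_same_ner_tags temp] else acc)
                    ++ [token_tag]) [] tag rest
      else if prev != "O" && tag == prev then
        mergeGoA acc (temp ++ [token_tag]) tag rest
      else
        mergeGoA ((if temp.length ≠ 0 then acc ++ [merge_same_ner_tags temp] else acc))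
          [token_tag] tag rest

def merge_ner_tags (text_ner_tags : List (String × String)) : List (String × String) :=
  mergeGoA [] [] "O" text_ner_tags

-- ===== PORT B =====
-- B scans the list run by run (inner while = takeWhile over the rest); each non-'O' run becomes
-- one joined tuple, an 'O' run is copied through unchanged.
def merge_ner_tags_alt (text_ner_tags : List (String × String)) : List (String × String) :=
  match text_ner_tags with
  | [] => []
  | tg :: rest =>
      let run := rest.takeWhile (fun p => p.2 == tg.2)
      let rest' := rest.dropWhile (fun p => p.2 == tg.2)
      (if tg.2 == "O" then tg :: run
       else [(PySem.Str.join " " ((tg :: run).map (·.1)), tg.2)]) ++ merge_ner_tags_alt rest'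
  termination_by text_ner_tags.length
  decreasing_by
    have := List.length_dropWhile_le (fun p => p.2 == tg.2) rest
    simp only [List.length_cons]
    omega

-- ===== PRECONDITION & SPEC =====
def Spec_merge_ner_tags (text_ner_tags : List (String × String)) (out : List (String × String)) : Prop := out = merge_ner_tags_alt text_ner_tags
instance (text_ner_tags : List (String × String)) (out : List (String × String)) : Decidable (Spec_merge_ner_tags text_ner_tags out) := by unfold Spec_merge_ner_tags; infer_instance

-- ===== CLAIM (what is proved, stated in full; the proofs are below) =====
def Claim_equal_merge_ner_tags : Prop := ∀ (text_ner_tags : List (String × String)), Dom_merge_ner_tags text_ner_tags → Spec_merge_ner_tags text_ner_tags (merge_ner_tags text_ner_tags)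

-- ===== LEMMAS AND PROOFS =====

-- the set of tags of a uniform, nonempty temp array is the singleton [g]
theorem foldl_add_fixed (g : String) (l : List String) (h : ∀ x ∈ l, x = g) :
    l.foldl PySem.Set.add [g] = [g] := by
  induction l with
  | nil => rfl
  | cons c r ihr =>
      have hc : c = g := h c List.mem_cons_self
      simp only [List.foldl_cons]
      have hadd : PySem.Set.add [g] c = [g] := by
        simp [PySem.Set.add, PySem.Set.contains, hc]
      rw [hadd]
      exact ihr (fun x hx => h x (List.mem_cons_of_mem _ hx))

theorem setOfList_uniform (g : String) (l : List String) (hne : l ≠ [])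
    (h : ∀ x ∈ l, x = g) : PySem.Set.ofList l = [g] := by
  cases l with
  | nil => exact absurd rfl hne
  | cons a t =>
      have ha : a = g := h a List.mem_cons_self
      rw [PySem.Set.ofList_eq_foldl]
      simp only [List.foldl_cons]
      have h0 : PySem.Set.add [] a = [g] := by
        simp [PySem.Set.add, PySem.Set.contains, ha]
      rw [h0]
      exact foldl_add_fixed g t (fun x hx => h x (List.mem_cons_of_mem _ hx))

-- unfolding equations for the run-scan (well-founded recursion)
theorem alt_nil : merge_ner_tags_alt [] = [] := by
  rw [merge_ner_tags_alt.eq_def]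

theorem alt_cons (tg : String × String) (rest : List (String × String)) :
    merge_ner_tags_alt (tg :: rest) =
      (if tg.2 == "O" then tg :: rest.takeWhile (fun p => p.2 == tg.2)
       else [(PySem.Str.join " " ((tg :: rest.takeWhile (fun p => p.2 == tg.2)).map (·.1)), tg.2)])
        ++ merge_ner_tags_alt (rest.dropWhile (fun p => p.2 == tg.2)) := by
  rw [merge_ner_tags_alt.eq_def]

theorem merge_uniform (g : String) (temp : List (String × String)) (hne : temp ≠ [])
    (h : ∀ p ∈ temp, p.2 = g) :
    merge_same_ner_tags temp = (PySem.Str.join " " (temp.map (·.1)), g) := by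
  unfold merge_same_ner_tags
  have : PySem.Set.ofList (temp.map (·.2)) = [g] := by
    apply setOfList_uniform
    · simpa using hne
    · intro x hx
      rcases List.mem_map.1 hx with ⟨p, hp, rfl⟩
      exact h p hp
  simp [this]

-- combined invariant lemma, by strong induction on the length of the remaining input:
-- (1) from the idle state (temp = [], prev = 'O') the machine produces acc ++ B;
-- (2) from a chain state (temp nonempty, uniform tag g ≠ 'O') it extends the chain across the
--     leading run of g, emits the merged tuple, and continues as B.
theorem mergeGoA_main (n : Nat) :
    ∀ (xs : List (String × String)), xs.length ≤ n →
      (∀ acc, mergeGoA acc [] "O" xs = acc ++ merge_ner_tags_alt xs) ∧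
      (∀ acc temp g, g ≠ "O" → temp ≠ [] → (∀ p ∈ temp, p.2 = g) →
        mergeGoA acc temp g xs =
          acc ++ [(PySem.Str.join " "
                    ((temp ++ xs.takeWhile (fun p => p.2 == g)).map (·.1)), g)]
              ++ merge_ner_tags_alt (xs.dropWhile (fun p => p.2 == g))) := by
  induction n with
  | zero =>
      intro xs hlen
      have hxs : xs = [] := List.length_eq_zero_iff.1 (Nat.le_zero.1 hlen)
      subst hxs
      constructor
      · intro acc; simp [mergeGoA, alt_nil]
      · intro acc temp g hg hne hu
        simp only [mergeGoA, List.takeWhile_nil, List.dropWhile_nil, List.append_nil]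
        have hl : temp.length ≠ 0 := by simpa [List.length_eq_zero_iff] using hne
        have hmt : PySem.Set.ofList (temp.map (·.2)) = [g] := by
          apply setOfList_uniform
          · simpa using hne
          · intro x hx; rcases List.mem_map.1 hx with ⟨p, hp, rfl⟩; exact hu p hp
        simp [hl, hmt, alt_nil]
  | succ n ih =>
      intro xs hlen
      cases xs with
      | nil =>
          constructor
          · intro acc; simp [mergeGoA, alt_nil]
          · intro acc temp g hg hne hu
            simp only [mergeGoA, List.takeWhile_nil, List.dropWhile_nil, List.append_nil]
            have hl : temp.length ≠ 0 := by simpa [List.length_eq_zero_iff] using hne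
            have hmt : PySem.Set.ofList (temp.map (·.2)) = [g] := by
              apply setOfList_uniform
              · simpa using hne
              · intro x hx; rcases List.mem_map.1 hx with ⟨p, hp, rfl⟩; exact hu p hp
            simp [hl, hmt, alt_nil]
      | cons x rest =>
          have hrest : rest.length ≤ n := by simpa using Nat.lt_succ_iff.1 (Nat.lt_of_lt_of_le (by simp) hlen)
          have hrest' : ∀ (ys : List (String × String)), ys.length ≤ rest.length →
              ys.length ≤ n := fun ys h => Nat.le_trans h hrest
          obtain ⟨ihE, ihC⟩ := ih rest hrest
          constructor
          · -- idle state
            intro acc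
            by_cases hO : x.2 = "O"
            · -- 'O' token: appended unchanged, stay idle
              rw [show mergeGoA acc [] "O" (x :: rest) = mergeGoA (acc ++ [x]) [] "O" rest by
                    simp [mergeGoA, hO]]
              rw [ihE (acc ++ [x])]
              -- B on an O-headed list: the whole O-run is copied through unchanged
              rw [alt_cons]
              simp only [hO, beq_self_eq_true, if_pos]
              -- need: (acc ++ [x]) ++ alt rest = acc ++ (x :: takeWhile ++ alt dropWhile)
              -- i.e. alt rest = takeWhile O rest ++ alt (dropWhile O rest)
              have hsplit : merge_ner_tags_alt rest =
                  rest.takeWhile (fun p => p.2 == "O")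
                    ++ merge_ner_tags_alt (rest.dropWhile (fun p => p.2 == "O")) := by
                cases rest with
                | nil => simp [alt_nil]
                | cons y r =>
                    by_cases hy : y.2 = "O"
                    · rw [alt_cons]
                      simp [hy]
                    · simp [List.takeWhile_cons, List.dropWhile_cons, hy]
              rw [hsplit]
              simp [hO]
            · -- non-'O' token from idle: start a new chain
              rw [show mergeGoA acc [] "O" (x :: rest) = mergeGoA acc [x] x.2 rest by
                    simp [mergeGoA, hO]]
              rw [ihC acc [x] x.2 hO (by simp) (by simp)]
              rw [alt_cons]
              simp [hO]
          · -- chain state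
            intro acc temp g hg hne hu
            have hl : temp.length ≠ 0 := by simpa [List.length_eq_zero_iff] using hne
            have hmerge := merge_uniform g temp hne hu
            by_cases hO : x.2 = "O"
            · -- 'O' token: flush the chain, emit x, back to idle
              have hxg : ¬ (x.2 = g) := fun h => hg (by rw [← h, hO])
              rw [show mergeGoA acc temp g (x :: rest)
                    = mergeGoA ((acc ++ [merge_same_ner_tags temp]) ++ [x]) [] x.2 rest by
                    simp [mergeGoA, hO, hl]]
              rw [hO, ihE]
              rw [hmerge]
              -- RHS: leading run of g is empty (x.2 = 'O' ≠ g)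
              have ht : (x :: rest).takeWhile (fun p => p.2 == g) = [] := by
                simp [List.takeWhile_cons, hxg]
              have hd : (x :: rest).dropWhile (fun p => p.2 == g) = x :: rest := by
                simp [List.dropWhile_cons, hxg]
              rw [ht, hd]
              rw [alt_cons]
              -- B on the O-headed remainder: same split lemma as above
              have hsplit : merge_ner_tags_alt rest =
                  rest.takeWhile (fun p => p.2 == "O")
                    ++ merge_ner_tags_alt (rest.dropWhile (fun p => p.2 == "O")) := by
                cases rest with
                | nil => simp [alt_nil]
                | cons y r =>
                    by_cases hy : y.2 = "O"
                    · rw [alt_cons]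
                      simp [hy]
                    · simp [List.takeWhile_cons, List.dropWhile_cons, hy]
              rw [hsplit]
              simp [hO]
            · by_cases hxg : x.2 = g
              · -- same tag: chain continues
                rw [show mergeGoA acc temp g (x :: rest)
                      = mergeGoA acc (temp ++ [x]) x.2 rest by
                      simp [mergeGoA, hO, hxg, hg]]
                rw [hxg]
                rw [ihC acc (temp ++ [x]) g hg (by simp)
                      (by intro p hp
                          rcases List.mem_append.1 hp with h | h
                          · exact hu p h
                          · simpa [List.mem_singleton.1 h] using hxg)]
                simp [List.takeWhile_cons, List.dropWhile_cons, hxg, List.append_assoc]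
              · -- different non-'O' tag: flush, start new chain
                rw [show mergeGoA acc temp g (x :: rest)
                      = mergeGoA (acc ++ [merge_same_ner_tags temp]) [x] x.2 rest by
                      simp [mergeGoA, hO, hxg, hl]]
                rw [ihC (acc ++ [merge_same_ner_tags temp]) [x] x.2 hO (by simp) (by simp)]
                rw [hmerge]
                have ht : (x :: rest).takeWhile (fun p => p.2 == g) = [] := by
                  simp [List.takeWhile_cons, hxg]
                have hd : (x :: rest).dropWhile (fun p => p.2 == g) = x :: rest := by
                  simp [List.dropWhile_cons, hxg]
                rw [ht, hd]
                rw [alt_cons]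
                simp [hO]

-- ===== VERDICT (by name: the statement is the Claim_ definition above) =====
theorem merge_ner_tags_spec : Claim_equal_merge_ner_tags := by
  intro xs _
  unfold Spec_merge_ner_tags merge_ner_tags
  have := (mergeGoA_main xs.length xs (Nat.le_refl _)).1 []
  simpa using this
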